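-- pv_equiv track=rewrite | github.com/Franklyc/Hallucination-Direction-Ablation | experiments/scripts/build_silver_mechanistic_dataset.py | balance_labels
-- ===== SOURCE A (Python) =====
-- from collections import Counter
--
-- def balance_labels(rows):
--     counts = Counter(row["label"] for row in rows)
--     if not counts:
--         return rows
--     target = min(counts.values())
--     out = []
--     kept = Counter()
--     for row in rows:
--         label = row["label"]
--         if kept[label] >= target:
--             continue
--         out.append(row)
--         kept[label] += 1
--     return out
-- ===== SOURCE B (Python) =====
-- def balance_labels(rows):
--     groups = {}
--     for i, row in enumerate(rows):
--         groups.setdefault(row["label"], []).append(i)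
--     if not groups:
--         return rows
--     target = min(len(g) for g in groups.values())
--     keep = set()
--     for g in groups.values():
--         keep.update(g[:target])
--     return [row for i, row in enumerate(rows) if i in keep]
-- ===== Notes on version B (the rewrite author's own statement) =====
-- stated objective: alternative
-- what changed: B replaces A's single pass with a per-label quota Counter by a label-to-index grouping table, a keep-set of each group's first `target` indices, and one final filtering pass over enumerate(rows).
import Mathlib
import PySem

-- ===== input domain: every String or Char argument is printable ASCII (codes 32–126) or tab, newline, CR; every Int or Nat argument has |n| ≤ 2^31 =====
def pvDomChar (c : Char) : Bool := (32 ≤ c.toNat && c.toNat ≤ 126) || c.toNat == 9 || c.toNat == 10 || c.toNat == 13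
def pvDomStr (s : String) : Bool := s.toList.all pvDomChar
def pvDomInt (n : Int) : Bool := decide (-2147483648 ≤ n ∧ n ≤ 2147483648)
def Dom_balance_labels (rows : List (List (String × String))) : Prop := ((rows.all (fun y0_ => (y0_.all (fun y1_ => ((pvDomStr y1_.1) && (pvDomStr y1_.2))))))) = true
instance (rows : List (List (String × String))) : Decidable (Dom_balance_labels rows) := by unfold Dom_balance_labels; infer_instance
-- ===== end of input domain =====

-- B replaces A's single quota-counting pass by a label→indices grouping table, a keep-set of each
-- group's first `target` indices, and one final filtering pass; same cost, different decomposition.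


-- ===== PORT A =====
-- row["label"]; Pre_ guarantees the key is present, so the getD default is unreachable on admitted inputs
def pvLabel (row : List (String × String)) : String :=
  ((PySem.Dict.mk row).get? "label").getD ""

def balance_labels (rows : List (List (String × String))) : List (List (String × String)) :=
  let counts : PySem.Dict String Int := PySem.Dict.counter (rows.map pvLabel)
  if counts.items = [] then rows
  else
    -- min(counts.values()); counts is nonempty here, so min? is some and getD's default is unreachable
    let target : Int := (PySem.List.min? counts.values (fun v => v)).getD 0
    let s := rows.foldl
      (fun (s : List (List (String × String)) × PySem.Dict String Int) row =>
        let label := pvLabel row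
        if target ≤ s.2.getD label 0 then s
        else (s.1 ++ [row], s.2.modify label 0 (· + 1)))
      ([], PySem.Dict.empty)
    s.1

-- ===== PORT B =====
def balance_labels_alt (rows : List (List (String × String))) : List (List (String × String)) :=
  let groups : PySem.Dict String (List Int) :=
    (PySem.List.enumerate rows).foldl
      (fun d p => d.modify (pvLabel p.2) [] (fun g => g ++ [p.1])) PySem.Dict.empty
  if groups.items = [] then rows
  else
    let target : Int :=
      (PySem.List.min? (groups.values.map (fun g => (g.length : Int))) (fun v => v)).getD 0
    let keep : PySem.Set Int :=
      groups.values.foldl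
        (fun s g => PySem.Set.update s (PySem.List.slice g none (some target))) PySem.Set.empty
    ((PySem.List.enumerate rows).filter (fun p => PySem.Set.contains keep p.1)).map (fun p => p.2)

-- ===== PRECONDITION & SPEC =====
-- Pre_ excludes rows (dicts) with no "label" key: there Python A raises KeyError (and B does too).
def Pre_balance_labels (rows : List (List (String × String))) : Prop :=
  ∀ r ∈ rows, ((PySem.Dict.mk r).get? "label").isSome = true
instance (rows : List (List (String × String))) : Decidable (Pre_balance_labels rows) := by
  unfold Pre_balance_labels; infer_instance

def pvWitness_balance_labels : (List (List (String × String))) :=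
  [[("label", "a")], [("label", "b"), ("x", "1")], [("label", "a")]]

def Spec_balance_labels (rows : List (List (String × String))) (out : List (List (String × String))) : Prop := out = balance_labels_alt rows
instance (rows : List (List (String × String))) (out : List (List (String × String))) : Decidable (Spec_balance_labels rows out) := by unfold Spec_balance_labels; infer_instance

-- ===== CLAIM (what is proved, stated in full; the proofs are below) =====
def Claim_equal_balance_labels : Prop := ∀ (rows : List (List (String × String))), Dom_balance_labels rows → Pre_balance_labels rows → Spec_balance_labels rows (balance_labels rows)

-- ===== LEMMAS AND PROOFS =====

-- the keep/skip recursion A's loop follows; cnt is the per-label tally capped at t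
def specK (t : Int) (cnt : String → Int) : List (List (String × String)) → List (List (String × String))
  | [] => []
  | r :: l =>
    if cnt (pvLabel r) < t then
      r :: specK t (fun x => if x = pvLabel r then cnt x + 1 else cnt x) l
    else specK t cnt l

lemma loopA (t : Int) (l : List (List (String × String))) :
    ∀ (out : List (List (String × String))) (d : PySem.Dict String Int) (cnt : String → Int),
    (∀ x, d.getD x 0 = min (cnt x) t) →
    (l.foldl
      (fun (s : List (List (String × String)) × PySem.Dict String Int) row =>
        if t ≤ s.2.getD (pvLabel row) 0 then s
        else (s.1 ++ [row], s.2.modify (pvLabel row) 0 (· + 1)))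
      (out, d)).1 = out ++ specK t cnt l := by
  induction l with
  | nil => intro out d cnt _; simp [specK]
  | cons r l ih =>
    intro out d cnt hd
    simp only [List.foldl_cons]
    rw [hd (pvLabel r)]
    by_cases h : cnt (pvLabel r) < t
    · rw [if_neg (by omega), specK, if_pos h]
      rw [ih (out ++ [r]) _ (fun x => if x = pvLabel r then cnt x + 1 else cnt x) ?_]
      · simp
      · intro x
        rw [PySem.Dict.getD_modify]
        show _ = min (if x = pvLabel r then cnt x + 1 else cnt x) t
        by_cases hx : x = pvLabel r
        · rw [if_pos hx, if_pos hx, hx, hd (pvLabel r)]; omega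
        · rw [if_neg hx, if_neg hx, hd x]
    · rw [if_pos (by omega), specK, if_neg h]
      exact ih out d cnt hd

-- B's group of a label: the indices of the rows carrying it, in order
def pvIdx (rows : List (List (String × String))) (L : String) : List Int :=
  ((PySem.List.enumerate rows).filter (fun p => pvLabel p.2 == L)).map (fun p => p.1)

def pvGroups (rows : List (List (String × String))) : PySem.Dict String (List Int) :=
  (PySem.List.enumerate rows).foldl
    (fun d p => d.modify (pvLabel p.2) [] (fun g => g ++ [p.1])) PySem.Dict.empty

lemma map_label_enumerate (rows : List (List (String × String))) (s : Int) :
    (PySem.List.enumerate rows s).map (fun p => pvLabel p.2) = rows.map pvLabel := by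
  rw [show (fun (p : Int × List (String × String)) => pvLabel p.2)
      = pvLabel ∘ (fun p : Int × List (String × String) => p.2) from rfl]
  rw [← List.map_map, PySem.List.map_snd_enumerate]

lemma keys_groups (rows : List (List (String × String))) :
    (pvGroups rows).keys = PySem.Set.ofList (rows.map pvLabel) := by
  unfold pvGroups
  rw [PySem.Dict.keys_foldl_modify_key (PySem.List.enumerate rows) (fun p => pvLabel p.2) []
        (fun _ p => fun g => g ++ [p.1]) PySem.Dict.empty,
      PySem.Dict.keys_empty, map_label_enumerate, PySem.Set.ofList_eq_foldl]
  rfl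

lemma nodup_keys_groups (rows : List (List (String × String))) : (pvGroups rows).keys.Nodup := by
  unfold pvGroups
  exact PySem.Dict.nodup_keys_foldl_modify_key _ _ _ _ _ (by simp [PySem.Dict.keys_empty])

lemma getD_groups (rows : List (List (String × String))) (L : String) :
    (pvGroups rows).getD L [] = pvIdx rows L := by
  unfold pvGroups pvIdx
  rw [show (PySem.List.enumerate rows).foldl
        (fun d p => d.modify (pvLabel p.2) [] (fun g => g ++ [p.1])) PySem.Dict.empty
      = ((PySem.List.enumerate rows).map (fun p => (pvLabel p.2, p.1))).foldl
        (fun d q => d.modify q.1 [] (fun g => g ++ [q.2])) PySem.Dict.empty from by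
      rw [List.foldl_map]]
  rw [PySem.Dict.getD_foldl_modify_append, PySem.Dict.getD_empty, List.filter_map, List.map_map]
  simp [Function.comp_def]

lemma values_groups (rows : List (List (String × String))) :
    (pvGroups rows).values = (PySem.Set.ofList (rows.map pvLabel)).map (pvIdx rows) := by
  rw [PySem.Dict.values_eq_map_keys _ (nodup_keys_groups rows) ([] : List Int), keys_groups]
  exact List.map_congr_left (fun L _ => getD_groups rows L)

lemma countP_enumerate_snd {α : Type} (q : α → Bool) :
    ∀ (xs : List α) (s : Int),
      (PySem.List.enumerate xs s).countP (fun p => q p.2) = xs.countP q := by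
  intro xs
  induction xs with
  | nil => intro s; simp [PySem.List.enumerate]
  | cons x l ih => intro s; rw [PySem.List.enumerate_cons]; simp [List.countP_cons, ih]

lemma length_idx (rows : List (List (String × String))) (L : String) :
    (pvIdx rows L).length = rows.countP (fun r => pvLabel r == L) := by
  unfold pvIdx
  rw [List.length_map, ← List.countP_eq_length_filter]
  exact countP_enumerate_snd (fun r => pvLabel r == L) rows 0

lemma count_labels (rows : List (List (String × String))) (L : String) :
    (rows.map pvLabel).count L = rows.countP (fun r => pvLabel r == L) := by
  rw [List.count_eq_countP, List.countP_map]; rfl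

lemma values_counter (xs : List String) :
    (PySem.Dict.counter xs).values
      = (PySem.Set.ofList xs).map (fun k => ((xs.count k : Nat) : Int)) := by
  show (PySem.Dict.counter xs).items.map (fun p => p.2) = _
  rw [PySem.Dict.items_counter, List.map_map]
  rfl

lemma targets_eq (rows : List (List (String × String))) :
    PySem.List.min? ((pvGroups rows).values.map (fun g => ((g.length : Nat) : Int))) (fun v => v)
      = PySem.List.min? (PySem.Dict.counter (rows.map pvLabel)).values (fun v => v) := by
  rw [values_groups, values_counter, List.map_map]
  congr 1
  exact List.map_congr_left (fun L _ => by
    simp [length_idx, count_labels])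

lemma one_le_t (rows : List (List (String × String))) (h : rows ≠ []) :
    1 ≤ (PySem.List.min? (PySem.Dict.counter (rows.map pvLabel)).values (fun v => v)).getD 0 := by
  obtain ⟨r, l, rfl⟩ := List.exists_cons_of_ne_nil h
  have hv : (PySem.Dict.counter ((r :: l).map pvLabel)).values ≠ [] := by
    rw [values_counter]
    intro hc
    have : pvLabel r ∈ PySem.Set.ofList ((r :: l).map pvLabel) :=
      (PySem.Set.mem_ofList _ _).mpr (by simp)
    rw [List.map_eq_nil_iff.mp hc] at this
    simp at this
  obtain ⟨m, hm⟩ : ∃ m, PySem.List.min? (PySem.Dict.counter ((r :: l).map pvLabel)).values (fun v => v) = some m := by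
    cases hmin : PySem.List.min? (PySem.Dict.counter ((r :: l).map pvLabel)).values (fun v => v) with
    | none => exact absurd ((PySem.List.min?_eq_none_iff _ _).mp hmin) hv
    | some m => exact ⟨m, rfl⟩
  rw [hm]
  have hmem := PySem.List.min?_mem hm
  rw [values_counter] at hmem
  obtain ⟨k, hk, rfl⟩ := List.mem_map.mp hmem
  have : k ∈ (r :: l).map pvLabel := (PySem.Set.mem_ofList _ _).mp hk
  have : 1 ≤ ((r :: l).map pvLabel).count k := List.one_le_count_iff.mpr this
  simp only [Option.getD_some]
  exact_mod_cast this

lemma counter_items_ne (rows : List (List (String × String))) (h : rows ≠ []) :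
    (PySem.Dict.counter (rows.map pvLabel)).items ≠ [] := by
  obtain ⟨r, l, rfl⟩ := List.exists_cons_of_ne_nil h
  rw [PySem.Dict.items_counter]
  intro hc
  have : pvLabel r ∈ PySem.Set.ofList ((r :: l).map pvLabel) :=
    (PySem.Set.mem_ofList _ _).mpr (by simp)
  rw [List.map_eq_nil_iff.mp hc] at this
  simp at this

lemma groups_items_ne (rows : List (List (String × String))) (h : rows ≠ []) :
    (pvGroups rows).items ≠ [] := by
  obtain ⟨r, l, rfl⟩ := List.exists_cons_of_ne_nil h
  intro hc
  have hk : (pvGroups (r :: l)).keys = [] := by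
    show (pvGroups (r :: l)).items.map (fun p => p.1) = []
    rw [hc]; rfl
  rw [keys_groups] at hk
  have : pvLabel r ∈ PySem.Set.ofList ((r :: l).map pvLabel) :=
    (PySem.Set.mem_ofList _ _).mpr (by simp)
  rw [hk] at this
  simp at this

lemma mem_keep_fold (t : Int) :
    ∀ (gs : List (List Int)) (s : PySem.Set Int) (i : Int),
      (i ∈ gs.foldl (fun s g => PySem.Set.update s (PySem.List.slice g none (some t))) s)
        ↔ i ∈ s ∨ ∃ g ∈ gs, i ∈ PySem.List.slice g none (some t) := by
  intro gs
  induction gs with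
  | nil => intro s i; simp
  | cons g gs ih =>
    intro s i
    rw [List.foldl_cons, ih, PySem.Set.mem_update]
    constructor
    · rintro (⟨hs | hg⟩ | ⟨g', hg', hi⟩)
      · exact Or.inl hs
      · exact Or.inr ⟨g, List.mem_cons_self .., hg⟩
      · exact Or.inr ⟨g', List.mem_cons_of_mem _ hg', hi⟩
    · rintro (hs | ⟨g', hg', hi⟩)
      · exact Or.inl (Or.inl hs)
      · rcases List.mem_cons.mp hg' with rfl | hg'
        · exact Or.inl (Or.inr hi)
        · exact Or.inr ⟨g', hg', hi⟩

lemma mem_take_sorted :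
    ∀ (l : List Int), l.Pairwise (· < ·) → ∀ (m : Nat) (a : Int),
      (a ∈ l.take m ↔ a ∈ l ∧ l.countP (fun x => decide (x < a)) < m) := by
  intro l
  induction l with
  | nil => intro _ m a; simp
  | cons x l ih =>
    intro hl m a
    rcases List.pairwise_cons.mp hl with ⟨hx, hl'⟩
    cases m with
    | zero => simp
    | succ m =>
      rw [List.take_succ_cons]
      by_cases hax : a = x
      · subst hax
        have h0 : l.countP (fun y => decide (y < a)) = 0 :=
          List.countP_eq_zero.mpr (fun y hy => by
            simp only [decide_eq_true_eq]; exact not_lt.mpr (le_of_lt (hx y hy)))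
        simp [h0]
      · by_cases hal : a ∈ l
        · have hxa : x < a := hx a hal
          rw [List.mem_cons, List.mem_cons]
          rw [List.countP_cons]
          simp only [hax, false_or, ih hl' m a, hal, true_and, hxa, decide_true, if_true]
          omega
        · have h1 : a ∉ l.take m := fun hc => hal (List.mem_of_mem_take hc)
          simp [hax, hal, h1]

lemma countP_enum_lt {α : Type} (q : α → Bool) (k : Nat) :
    ∀ (xs : List α) (s : Nat),
      (PySem.List.enumerate xs ((s : Nat) : Int)).countP
          (fun p => decide (p.1 < ((k : Nat) : Int)) && q p.2)
        = (xs.take (k - s)).countP q := by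
  intro xs
  induction xs with
  | nil => intro s; simp [PySem.List.enumerate]
  | cons x l ih =>
    intro s
    rw [PySem.List.enumerate_cons, List.countP_cons]
    rw [show ((s : Nat) : Int) + 1 = (((s + 1 : Nat)) : Int) from by push_cast; ring, ih (s + 1)]
    by_cases hsk : s < k
    · have h1 : k - s = (k - (s + 1)) + 1 := by omega
      have hd : decide (((s : Nat) : Int) < ((k : Nat) : Int)) = true := by
        simp only [decide_eq_true_eq]; exact_mod_cast hsk
      rw [h1, List.take_succ_cons, List.countP_cons, hd]
      simp
    · have h0 : k - s = 0 := by omega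
      have h1 : k - (s + 1) = 0 := by omega
      have hd : decide (((s : Nat) : Int) < ((k : Nat) : Int)) = false := by
        simp only [decide_eq_false_iff_not]; intro hc; exact hsk (by exact_mod_cast hc)
      rw [h0, h1, hd]
      simp

lemma idx_pairwise (rows : List (List (String × String))) (L : String) :
    (pvIdx rows L).Pairwise (· < ·) := by
  unfold pvIdx
  rw [List.pairwise_map]
  exact List.Pairwise.filter _ (PySem.List.pairwise_lt_enumerate rows 0)

lemma mem_idx_iff (rows : List (List (String × String))) (L : String) (k : Nat)
    (hk : k < rows.length) :
    (((k : Nat) : Int) ∈ pvIdx rows L) ↔ pvLabel rows[k] = L := by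
  unfold pvIdx
  constructor
  · intro h
    obtain ⟨p, hp, hp1⟩ := List.mem_map.mp h
    obtain ⟨hpe, hpl⟩ := List.mem_filter.mp hp
    obtain ⟨j, hj, rfl⟩ := (PySem.List.mem_enumerate_iff rows 0 p).mp hpe
    simp only at hp1 hpl
    have hjk : j = k := by omega
    subst hjk
    simpa using hpl
  · intro h
    refine List.mem_map.mpr ⟨(((k : Nat) : Int), rows[k]), List.mem_filter.mpr ⟨?_, by simp [h]⟩, rfl⟩
    exact (PySem.List.mem_enumerate_iff rows 0 _).mpr ⟨k, hk, by simp⟩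

lemma countP_idx_lt (rows : List (List (String × String))) (L : String) (k : Nat) :
    (pvIdx rows L).countP (fun x => decide (x < ((k : Nat) : Int)))
      = (rows.take k).countP (fun r => pvLabel r == L) := by
  unfold pvIdx
  rw [List.countP_map, List.countP_filter]
  have := countP_enum_lt (fun r => pvLabel r == L) k rows 0
  simp only [Nat.cast_zero, Nat.sub_zero] at this
  rw [← this]
  rfl

lemma mem_keep_iff (rows : List (List (String × String))) (t : Int) (ht : 1 ≤ t)
    (k : Nat) (hk : k < rows.length) :
    (((k : Nat) : Int) ∈ (pvGroups rows).values.foldl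
        (fun s g => PySem.Set.update s (PySem.List.slice g none (some t))) PySem.Set.empty)
      ↔ (((rows.take k).countP (fun r => pvLabel r == pvLabel rows[k]) : Nat) : Int) < t := by
  rw [mem_keep_fold, values_groups]
  have hslice : ∀ g : List Int, PySem.List.slice g none (some t) = g.take t.toNat :=
    fun g => PySem.List.slice_to g (by omega)
  constructor
  · rintro (hs | ⟨g, hg, hi⟩)
    · simp [PySem.Set.empty] at hs
    · obtain ⟨L, _, rfl⟩ := List.mem_map.mp hg
      rw [hslice] at hi
      have hmem := (mem_take_sorted _ (idx_pairwise rows L) t.toNat _).mp hi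
      have hL : pvLabel rows[k] = L := (mem_idx_iff rows L k hk).mp hmem.1
      subst hL
      have := hmem.2
      rw [countP_idx_lt] at this
      omega
  · intro h
    refine Or.inr ⟨pvIdx rows (pvLabel rows[k]), ?_, ?_⟩
    · refine List.mem_map.mpr ⟨pvLabel rows[k], ?_, rfl⟩
      exact (PySem.Set.mem_ofList _ _).mpr (List.mem_map.mpr ⟨rows[k], by simp, rfl⟩)
    · rw [hslice]
      refine (mem_take_sorted _ (idx_pairwise rows (pvLabel rows[k])) t.toNat _).mpr
        ⟨(mem_idx_iff rows _ k hk).mpr rfl, ?_⟩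
      rw [countP_idx_lt]
      omega

lemma filterB (rows : List (List (String × String))) (t : Int)
    (Q : Int × List (String × String) → Bool)
    (hQ : ∀ (k : Nat) (hk : k < rows.length),
      Q (((k : Nat) : Int), rows[k])
        = decide ((((rows.take k).countP (fun r => pvLabel r == pvLabel rows[k]) : Nat) : Int) < t)) :
    ∀ (l pre : List (List (String × String))) (cnt : String → Int),
      pre ++ l = rows →
      (∀ L, cnt L = min ((pre.countP (fun r => pvLabel r == L) : Nat) : Int) t) →
      ((PySem.List.enumerate l ((pre.length : Nat) : Int)).filter Q).map (fun p => p.2)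
        = specK t cnt l := by
  intro l
  induction l with
  | nil => intro pre cnt _ _; simp [PySem.List.enumerate, specK]
  | cons r l ih =>
    intro pre cnt hrows hcnt
    rw [PySem.List.enumerate_cons, List.filter_cons]
    have hk : pre.length < rows.length := by rw [← hrows]; simp
    have hr : rows[pre.length]'hk = r := by
      have : (pre ++ r :: l)[pre.length]'(by simp) = r := by simp
      simp only [← hrows]
      exact this
    have hpre : rows.take pre.length = pre := by rw [← hrows]; exact List.take_left ..
    have hQh := hQ pre.length hk
    rw [hr, hpre] at hQh
    have hguard : Q (((pre.length : Nat) : Int), r)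
        = decide (cnt (pvLabel r) < t) := by
      rw [hQh]
      simp only [decide_eq_decide]
      rw [hcnt (pvLabel r)]
      omega
    have hc : ∀ L : String, (((pre ++ [r]).countP (fun x => pvLabel x == L) : Nat) : Int)
        = ((pre.countP (fun x => pvLabel x == L) : Nat) : Int) + (if L = pvLabel r then 1 else 0) := by
      intro L
      rw [List.countP_append, List.countP_cons, List.countP_nil]
      by_cases hL : L = pvLabel r
      · have hb : (pvLabel r == L) = true := by rw [beq_iff_eq, hL]
        rw [hb, if_pos hL]; simp
      · have hb : (pvLabel r == L) = false := by
          rw [beq_eq_false_iff_ne]; exact fun h => hL h.symm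
        rw [hb, if_neg hL]; simp
    have hlen : (((pre ++ [r]).length : Nat) : Int) = ((pre.length : Nat) : Int) + 1 := by
      simp
    by_cases hlt : cnt (pvLabel r) < t
    · rw [hguard, decide_eq_true hlt, if_pos rfl, specK, if_pos hlt, List.map_cons]
      congr 1
      rw [← hlen]
      refine ih (pre ++ [r]) _ (by rw [← hrows]; simp) ?_
      intro L
      show (if L = pvLabel r then cnt L + 1 else cnt L) = _
      rw [hc L]
      by_cases hL : L = pvLabel r
      · rw [if_pos hL, if_pos hL]
        have h1 := hcnt L
        subst hL
        omega
      · rw [if_neg hL, if_neg hL]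
        have h1 := hcnt L
        omega
    · rw [hguard, decide_eq_false hlt, if_neg (by simp), specK, if_neg hlt]
      rw [← hlen]
      refine ih (pre ++ [r]) _ (by rw [← hrows]; simp) ?_
      intro L
      rw [hc L]
      by_cases hL : L = pvLabel r
      · rw [if_pos hL]
        have h1 := hcnt L
        subst hL
        omega
      · rw [if_neg hL]
        have h1 := hcnt L
        omega

-- ===== VERDICT (by name: the statement is the Claim_ definition above) =====
theorem balance_labels_spec : Claim_equal_balance_labels := by
  intro rows _ _
  simp only [Spec_balance_labels, balance_labels, balance_labels_alt]
  by_cases hnil : rows = []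
  · subst hnil; rfl
  · rw [show (List.foldl (fun d p => d.modify (pvLabel p.2) [] fun g => g ++ [p.1])
        PySem.Dict.empty (PySem.List.enumerate rows)) = pvGroups rows from rfl]
    rw [if_neg (counter_items_ne rows hnil), if_neg (groups_items_ne rows hnil)]
    have ht1 : 1 ≤ (PySem.List.min? (PySem.Dict.counter (rows.map pvLabel)).values (fun v => v)).getD 0 :=
      one_le_t rows hnil
    set tA := (PySem.List.min? (PySem.Dict.counter (rows.map pvLabel)).values (fun v => v)).getD 0 with htA
    have htgt : (PySem.List.min? ((pvGroups rows).values.map (fun g => ((g.length : Nat) : Int))) (fun v => v)).getD 0 = tA := by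
      rw [targets_eq]
    rw [htgt]
    rw [loopA tA rows [] PySem.Dict.empty (fun _ => 0)
      (fun x => by rw [PySem.Dict.getD_empty]; show (0 : Int) = min 0 tA; omega), List.nil_append]
    have hQ : ∀ (k : Nat) (hk : k < rows.length),
        (fun p : Int × List (String × String) => PySem.Set.contains
            (List.foldl (fun s g => PySem.Set.update s (PySem.List.slice g none (some tA)))
              PySem.Set.empty (pvGroups rows).values) p.1) (((k : Nat) : Int), rows[k])
          = decide ((((rows.take k).countP (fun r => pvLabel r == pvLabel rows[k]) : Nat) : Int) < tA) := by
      intro k hk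
      show PySem.Set.contains _ ((k : Nat) : Int) = _
      have hm := mem_keep_iff rows tA ht1 k hk
      by_cases hmm : (((k : Nat) : Int)) ∈ (pvGroups rows).values.foldl
          (fun s g => PySem.Set.update s (PySem.List.slice g none (some tA))) PySem.Set.empty
      · rw [(PySem.Set.contains_iff _ _).mpr hmm]
        exact (decide_eq_true (hm.mp hmm)).symm
      · have c1 : PySem.Set.contains ((pvGroups rows).values.foldl
            (fun s g => PySem.Set.update s (PySem.List.slice g none (some tA))) PySem.Set.empty)
            (((k : Nat) : Int)) = false := by
          cases hcc : PySem.Set.contains ((pvGroups rows).values.foldl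
            (fun s g => PySem.Set.update s (PySem.List.slice g none (some tA))) PySem.Set.empty)
            (((k : Nat) : Int)) with
          | false => rfl
          | true => exact absurd ((PySem.Set.contains_iff _ _).mp hcc) hmm
        rw [c1]
        exact (decide_eq_false (fun hc => hmm (hm.mpr hc))).symm
    have hB := filterB rows tA
      (fun p : Int × List (String × String) => PySem.Set.contains
        (List.foldl (fun s g => PySem.Set.update s (PySem.List.slice g none (some tA)))
          PySem.Set.empty (pvGroups rows).values) p.1) hQ rows [] (fun _ => 0) rfl
      (fun L => by simp [List.countP_nil]; omega)
    exact hB.symm
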